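-- pv_equiv track=rewrite | github.com/yashkp1234/baseball-swing-analyzer | src/baseball_swing_analyzer/swing_segments.py | _merge_runs
-- ===== SOURCE A (Python) =====
-- def _merge_runs(runs: list[tuple[int, int]], max_gap: int) -> list[tuple[int, int]]:
--     if not runs:
--         return []
--     merged = [runs[0]]
--     for start, end in runs[1:]:
--         prev_start, prev_end = merged[-1]
--         if start - prev_end <= max_gap:
--             merged[-1] = (prev_start, end)
--         else:
--             merged.append((start, end))
--     return merged
-- ===== SOURCE B (Python) =====
-- def _merge_runs(runs: list[tuple[int, int]], max_gap: int) -> list[tuple[int, int]]: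
--     # Divide and conquer: merge each half independently, then glue the halves,
--     # joining the last segment of the left with the first of the right when close.
--     n = len(runs)
--     if n <= 1:
--         return list(runs)
--     mid = n // 2
--     left = _merge_runs(runs[:mid], max_gap)
--     right = _merge_runs(runs[mid:], max_gap)
--     if right[0][0] - left[-1][1] <= max_gap:
--         return left[:-1] + [(left[-1][0], right[0][1])] + right[1:]
--     return left + right
-- ===== Notes on version B (the rewrite author's own statement) =====
-- stated objective: alternative
-- what changed: Replaces A's single left-to-right extend-last-segment pass with a divide-and-conquer recursion: each half of the list is merged independently and the two merged halves are glued, joining the left's last segment with the right's first when their gap is within max_gap.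
import Mathlib
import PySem

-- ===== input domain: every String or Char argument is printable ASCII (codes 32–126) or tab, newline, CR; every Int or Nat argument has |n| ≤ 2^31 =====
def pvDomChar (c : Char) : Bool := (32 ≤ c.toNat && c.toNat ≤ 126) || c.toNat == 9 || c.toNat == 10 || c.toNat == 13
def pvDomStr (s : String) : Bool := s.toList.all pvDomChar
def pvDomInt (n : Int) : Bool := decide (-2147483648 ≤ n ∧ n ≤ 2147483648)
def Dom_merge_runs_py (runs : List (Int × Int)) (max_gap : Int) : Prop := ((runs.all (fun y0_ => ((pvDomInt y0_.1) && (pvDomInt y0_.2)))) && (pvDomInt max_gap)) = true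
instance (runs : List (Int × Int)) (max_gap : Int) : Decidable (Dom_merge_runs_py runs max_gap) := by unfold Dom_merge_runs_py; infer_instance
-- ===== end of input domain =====

-- B replaces A's single extend-last-segment pass by a divide-and-conquer recursion
-- that merges each half and glues them at the boundary; same results (objective: alternative).


-- ===== PORT A =====
-- one step of A's loop: extend merged's last segment or append a new one
def mergeStepA (max_gap : Int) (merged : List (Int × Int)) (se : Int × Int) : List (Int × Int) :=
  if se.1 - (merged.getLastD (0, 0)).2 ≤ max_gap then
    merged.dropLast ++ [((merged.getLastD (0, 0)).1, se.2)]
  else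
    merged ++ [se]

def merge_runs_py (runs : List (Int × Int)) (max_gap : Int) : List (Int × Int) :=
  match runs with
  | [] => []
  | r0 :: rest => rest.foldl (mergeStepA max_gap) [r0]

-- ===== PORT B =====
-- divide and conquer: merge each half, then glue the two merged halves
def merge_runs_py_alt (runs : List (Int × Int)) (max_gap : Int) : List (Int × Int) :=
  if _h : runs.length ≤ 1 then runs
  else
    let mid := runs.length / 2
    let L := merge_runs_py_alt (runs.take mid) max_gap
    let R := merge_runs_py_alt (runs.drop mid) max_gap
    if (R.headD (0, 0)).1 - (L.getLastD (0, 0)).2 ≤ max_gap then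
      L.dropLast ++ [((L.getLastD (0, 0)).1, (R.headD (0, 0)).2)] ++ R.tail
    else
      L ++ R
termination_by runs.length
decreasing_by
  · simp only [List.length_take]; omega
  · simp only [List.length_drop]; omega

-- ===== PRECONDITION & SPEC =====
def Spec_merge_runs_py (runs : List (Int × Int)) (max_gap : Int) (out : List (Int × Int)) : Prop := out = merge_runs_py_alt runs max_gap
instance (runs : List (Int × Int)) (max_gap : Int) (out : List (Int × Int)) : Decidable (Spec_merge_runs_py runs max_gap out) := by unfold Spec_merge_runs_py; infer_instance

-- ===== CLAIM (what is proved, stated in full; the proofs are below) =====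
def Claim_equal_merge_runs_py : Prop := ∀ (runs : List (Int × Int)) (max_gap : Int), Dom_merge_runs_py runs max_gap → Spec_merge_runs_py runs max_gap (merge_runs_py runs max_gap)

-- ===== LEMMAS AND PROOFS =====

-- A's fold never empties its accumulator
theorem foldA_ne_nil (g : Int) (t : List (Int × Int)) :
    ∀ m : List (Int × Int), m ≠ [] → t.foldl (mergeStepA g) m ≠ [] := by
  induction t with
  | nil => intro m hm; simpa using hm
  | cons h t ih =>
    intro m hm
    refine ih _ ?_
    unfold mergeStepA
    split <;> simp

-- A's step only looks at the accumulator's last element, so a prefix passes through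
theorem foldA_prefix (g : Int) (t : List (Int × Int)) :
    ∀ (pre m : List (Int × Int)), m ≠ [] →
      t.foldl (mergeStepA g) (pre ++ m) = pre ++ t.foldl (mergeStepA g) m := by
  induction t with
  | nil => intro pre m _; rfl
  | cons h t ih =>
    intro pre m hm
    have hstep : mergeStepA g (pre ++ m) h = pre ++ mergeStepA g m h := by
      unfold mergeStepA
      obtain ⟨m', l, rfl⟩ := (m.eq_nil_or_concat' ).resolve_left hm
      simp [List.dropLast_append_of_ne_nil, List.append_assoc]
      split <;> simp
    have hne : mergeStepA g m h ≠ [] := by unfold mergeStepA; split <;> simp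
    simp only [List.foldl_cons, hstep, ih _ _ hne]

-- replace the first segment's start
def repHead (a : Int) (l : List (Int × Int)) : List (Int × Int) :=
  match l with
  | [] => []
  | (_, y) :: r => (a, y) :: r

-- the start of the open first segment is carried along unchanged by A's fold
theorem foldA_headstart (g : Int) (t : List (Int × Int)) :
    ∀ (e a b : Int),
      t.foldl (mergeStepA g) [(a, e)] = repHead a (t.foldl (mergeStepA g) [(b, e)]) := by
  induction t with
  | nil => intro e a b; rfl
  | cons h t ih =>
    intro e a b
    simp only [List.foldl_cons]
    by_cases hc : h.1 - e ≤ g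
    · have ha : mergeStepA g [(a, e)] h = [(a, h.2)] := by simp [mergeStepA, hc]
      have hb : mergeStepA g [(b, e)] h = [(b, h.2)] := by simp [mergeStepA, hc]
      rw [ha, hb]; exact ih h.2 a b
    · have ha : mergeStepA g [(a, e)] h = [(a, e)] ++ [h] := by simp [mergeStepA, hc]
      have hb : mergeStepA g [(b, e)] h = [(b, e)] ++ [h] := by simp [mergeStepA, hc]
      rw [ha, hb, foldA_prefix g t [(a, e)] [h] (by simp),
          foldA_prefix g t [(b, e)] [h] (by simp)]
      rfl

-- the merged list's first start is the first run's start
theorem foldA_head_fst (g : Int) (t : List (Int × Int)) (s e : Int) :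
    ((t.foldl (mergeStepA g) [(s, e)]).headD (0, 0)).1 = s := by
  have h := foldA_headstart g t e s s
  have hne := foldA_ne_nil g t [(s, e)] (by simp)
  rw [h]
  rcases hres : t.foldl (mergeStepA g) [(s, e)] with _ | ⟨⟨x, y⟩, r⟩
  · exact absurd hres hne
  · simp [repHead]

-- glue: merging a concatenation = merging the parts and joining at the boundary
theorem mergeA_glue (g : Int) (xs ys : List (Int × Int)) (hx : xs ≠ []) (hy : ys ≠ []) :
    merge_runs_py (xs ++ ys) g =
      (let L := merge_runs_py xs g
       let R := merge_runs_py ys g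
       if (R.headD (0, 0)).1 - (L.getLastD (0, 0)).2 ≤ g then
         L.dropLast ++ [((L.getLastD (0, 0)).1, (R.headD (0, 0)).2)] ++ R.tail
       else
         L ++ R) := by
  obtain ⟨x0, xs', rfl⟩ := List.exists_cons_of_ne_nil hx
  obtain ⟨y0, ys', rfl⟩ := List.exists_cons_of_ne_nil hy
  simp only [merge_runs_py, List.cons_append]
  rw [show xs' ++ y0 :: ys' = (xs' ++ [y0]) ++ ys' by simp, List.foldl_append,
      List.foldl_append]
  set L := xs'.foldl (mergeStepA g) [x0] with hL
  have hLne : L ≠ [] := foldA_ne_nil g xs' [x0] (by simp)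
  obtain ⟨L', l, hLc⟩ := (L.eq_nil_or_concat').resolve_left hLne
  have hRhead : ((ys'.foldl (mergeStepA g) [y0]).headD (0, 0)).1 = y0.1 := by
    have := foldA_head_fst g ys' y0.1 y0.2
    simpa using this
  have hRne : ys'.foldl (mergeStepA g) [y0] ≠ [] := foldA_ne_nil g ys' [y0] (by simp)
  simp only [List.foldl_cons, List.foldl_nil]
  rw [hLc]
  by_cases hc : y0.1 - l.2 ≤ g
  · have hstep : mergeStepA g (L' ++ [l]) y0 = L' ++ [(l.1, y0.2)] := by
      simp [mergeStepA, hc, List.dropLast_append_of_ne_nil]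
    rw [hstep, foldA_prefix g ys' L' [(l.1, y0.2)] (by simp)]
    have hrep : ys'.foldl (mergeStepA g) [(l.1, y0.2)] =
        repHead l.1 (ys'.foldl (mergeStepA g) [y0]) := by
      have := foldA_headstart g ys' y0.2 l.1 y0.1
      simpa using this
    rw [hrep]
    have hcond : ((ys'.foldl (mergeStepA g) [y0]).headD (0, 0)).1 -
        ((L' ++ [l]).getLastD (0, 0)).2 ≤ g := by
      rw [hRhead, List.getLastD_concat]; exact hc
    rw [if_pos hcond]
    obtain ⟨r0, R', hRc⟩ := List.exists_cons_of_ne_nil hRne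
    rw [hRc]
    obtain ⟨r1, r2⟩ := r0
    simp [repHead, List.dropLast_append_of_ne_nil]
  · have hstep : mergeStepA g (L' ++ [l]) y0 = (L' ++ [l]) ++ [y0] := by
      simp [mergeStepA, hc]
    rw [hstep, foldA_prefix g ys' (L' ++ [l]) [y0] (by simp)]
    have hcond : ¬ ((ys'.foldl (mergeStepA g) [y0]).headD (0, 0)).1 -
        ((L' ++ [l]).getLastD (0, 0)).2 ≤ g := by
      rw [hRhead, List.getLastD_concat]; exact hc
    rw [if_neg hcond]

-- B computes the same as A, by strong induction on the length
theorem altA_eq (g : Int) : ∀ (n : Nat) (runs : List (Int × Int)), runs.length ≤ n →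
    merge_runs_py_alt runs g = merge_runs_py runs g := by
  intro n
  induction n with
  | zero =>
    intro runs h
    have : runs = [] := List.eq_nil_of_length_eq_zero (Nat.le_zero.mp h)
    subst this
    rw [merge_runs_py_alt]
    rfl
  | succ n ih =>
    intro runs hlen
    by_cases h1 : runs.length ≤ 1
    · rw [merge_runs_py_alt, dif_pos h1]
      match runs, h1 with
      | [], _ => rfl
      | [r], _ => rfl
    · rw [merge_runs_py_alt, dif_neg h1]
      have h2 : 2 ≤ runs.length := by omega
      have hmid1 : 1 ≤ runs.length / 2 := by omega
      have hmid2 : runs.length / 2 < runs.length := by omega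
      have htake : (runs.take (runs.length / 2)).length ≤ n := by
        simp only [List.length_take]; omega
      have hdrop : (runs.drop (runs.length / 2)).length ≤ n := by
        simp only [List.length_drop]; omega
      have htne : runs.take (runs.length / 2) ≠ [] := by
        intro hc; have := congrArg List.length hc
        simp only [List.length_take, List.length_nil] at this; omega
      have hdne : runs.drop (runs.length / 2) ≠ [] := by
        intro hc; have := congrArg List.length hc
        simp only [List.length_drop, List.length_nil] at this; omega
      simp only [ih _ htake, ih _ hdrop]
      have := mergeA_glue g (runs.take (runs.length / 2)) (runs.drop (runs.length / 2)) htne hdne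
      rw [List.take_append_drop] at this
      rw [← this]

-- ===== VERDICT (by name: the statement is the Claim_ definition above) =====
theorem merge_runs_py_spec : Claim_equal_merge_runs_py := by
  intro runs max_gap _
  unfold Spec_merge_runs_py
  exact (altA_eq max_gap runs.length runs le_rfl).symm
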